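-- pv_equiv track=rewrite | github.com/sunghj1118/algorithm | 백준/Gold/10159. 저울/저울.py | solve
-- ===== SOURCE A (Python) =====
-- from collections import defaultdict
--
-- def dfs(graph, start, visited):
--     visited.add(start)
--     for neighbor in graph[start]:
--         if neighbor not in visited:
--             dfs(graph, neighbor, visited)
--
-- def solve(n, comparisons):
--     graph = defaultdict(list)
--     reverse_graph = defaultdict(list)
--     for a,b in comparisons:
--         graph[a].append(b)
--         reverse_graph[b].append(a)
--
--     results = []
--     for i in range(1, n+1):
--         # find lighter items
--         lighter = set()
--         dfs(graph, i, lighter)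
--
--         # find heavier items
--         heavier = set()
--         dfs(reverse_graph, i, heavier)
--
--         # count unknown relationships
--         unknown = n - len(lighter | heavier)
--         results.append(unknown)
--
--     return results
-- ===== SOURCE B (Python) =====
-- def solve(n, comparisons):
--     succ = {}
--     pred = {}
--     for a, b in comparisons:
--         succ.setdefault(a, []).append(b)
--         pred.setdefault(b, []).append(a)
--
--     def reach(adj, i):
--         seen = {i}
--         frontier = [i]
--         while frontier:
--             nxt = []
--             for a in frontier:
--                 for b in adj.get(a, ()):
--                     if b not in seen:
--                         seen.add(b)
--                         nxt.append(b)
--             frontier = nxt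
--         return seen
--
--     return [n - len(reach(succ, i) | reach(pred, i))
--             for i in range(1, n + 1)]
-- ===== Notes on version B (the rewrite author's own statement) =====
-- stated objective: alternative
-- what changed: The per-node recursive DFS (mutating a visited set through recursion) is replaced by an iterative breadth-first worklist closure: a frontier list is expanded level by level until no new node appears, with no recursion.
import Mathlib
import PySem

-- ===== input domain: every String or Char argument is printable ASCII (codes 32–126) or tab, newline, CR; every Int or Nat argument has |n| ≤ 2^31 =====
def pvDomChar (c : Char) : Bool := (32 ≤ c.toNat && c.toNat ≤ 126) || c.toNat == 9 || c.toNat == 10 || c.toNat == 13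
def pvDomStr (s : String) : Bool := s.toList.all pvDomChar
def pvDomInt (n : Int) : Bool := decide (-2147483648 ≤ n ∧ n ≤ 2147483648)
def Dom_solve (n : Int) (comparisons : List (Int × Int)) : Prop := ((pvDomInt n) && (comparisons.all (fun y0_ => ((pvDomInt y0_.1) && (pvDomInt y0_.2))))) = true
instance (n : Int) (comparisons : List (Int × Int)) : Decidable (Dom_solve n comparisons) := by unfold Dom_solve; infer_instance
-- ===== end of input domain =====

-- B replaces A's per-node recursive DFS by an iterative breadth-first worklist closure (alternative
-- decomposition, similar cost); A mutates no argument; equivalence is about the return value.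

-- ===== PORT A =====
-- dfs(graph, start, visited): fuel makes the recursion total; fuel = len(comparisons)+1 is provably
-- never exhausted (each nested call visits a fresh neighbour, of which there are at most len(comparisons)).
def dfsA (g : PySem.Dict Int (List Int)) : Nat → Int → PySem.Set Int → PySem.Set Int
  | 0, _, visited => visited
  | fuel+1, start, visited =>
    (g.getD start []).foldl
      (fun v nb => if PySem.Set.contains v nb then v else dfsA g fuel nb v)
      (PySem.Set.add visited start)

def solve (n : Int) (comparisons : List (Int × Int)) : List Int :=
  let gs : PySem.Dict Int (List Int) × PySem.Dict Int (List Int) :=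
    comparisons.foldl
      (fun p ab => (p.1.modify ab.1 [] (· ++ [ab.2]), p.2.modify ab.2 [] (· ++ [ab.1])))
      (PySem.Dict.empty, PySem.Dict.empty)
  let fuel := comparisons.length + 1
  (PySem.List.pyRange 1 (n+1) 1).foldl
    (fun results i =>
      let lighter := dfsA gs.1 fuel i PySem.Set.empty
      let heavier := dfsA gs.2 fuel i PySem.Set.empty
      results ++ [n - (PySem.Set.union lighter heavier).length])
    []

-- ===== PORT B =====
-- body of 'if b not in seen: seen.add(b); nxt.append(b)'
def stepQ (q : PySem.Set Int × List Int) (b : Int) : PySem.Set Int × List Int :=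
  if PySem.Set.contains q.1 b then q else (PySem.Set.add q.1 b, q.2 ++ [b])

-- 'for b in adj.get(a, ()): ...'
def expandQ (adj : PySem.Dict Int (List Int)) (q : PySem.Set Int × List Int) (a : Int) :
    PySem.Set Int × List Int :=
  (adj.getD a []).foldl stepQ q

-- 'while frontier: ...': fuel makes the while loop total; fuel = len(comparisons)+2 is provably
-- never exhausted (every round but the last two grows seen by a fresh neighbour, of which there
-- are at most len(comparisons)).
def bfsB (adj : PySem.Dict Int (List Int)) : Nat → PySem.Set Int → List Int → PySem.Set Int
  | 0, seen, _ => seen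
  | f+1, seen, frontier =>
    if frontier = [] then seen
    else
      let p := frontier.foldl (expandQ adj) (seen, [])
      bfsB adj f p.1 p.2

def reachB (adj : PySem.Dict Int (List Int)) (fuel : Nat) (i : Int) : PySem.Set Int :=
  bfsB adj fuel (PySem.Set.ofList [i]) [i]

def solve_alt (n : Int) (comparisons : List (Int × Int)) : List Int :=
  let gs : PySem.Dict Int (List Int) × PySem.Dict Int (List Int) :=
    comparisons.foldl
      (fun p ab => (p.1.modify ab.1 [] (· ++ [ab.2]), p.2.modify ab.2 [] (· ++ [ab.1])))
      (PySem.Dict.empty, PySem.Dict.empty)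
  let fuel := comparisons.length + 2
  (PySem.List.pyRange 1 (n+1) 1).map
    (fun i => n - (PySem.Set.union (reachB gs.1 fuel i) (reachB gs.2 fuel i)).length)

-- ===== PRECONDITION & SPEC =====
def Spec_solve (n : Int) (comparisons : List (Int × Int)) (out : List Int) : Prop := out = solve_alt n comparisons
instance (n : Int) (comparisons : List (Int × Int)) (out : List Int) : Decidable (Spec_solve n comparisons out) := by unfold Spec_solve; infer_instance

-- ===== CLAIM (what is proved, stated in full; the proofs are below) =====
def Claim_equal_solve : Prop := ∀ (n : Int) (comparisons : List (Int × Int)), Dom_solve n comparisons → Spec_solve n comparisons (solve n comparisons)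

-- ===== LEMMAS AND PROOFS =====

-- ---- proof-side definitions ----

-- the body of A's neighbour loop
def stepA (g : PySem.Dict Int (List Int)) (f : Nat) (v : PySem.Set Int) (nb : Int) : PySem.Set Int :=
  if PySem.Set.contains v nb then v else dfsA g f nb v

-- edge relation read off A's adjacency dict
def RelG (g : PySem.Dict Int (List Int)) (a b : Int) : Prop := b ∈ g.getD a []

-- DFS termination measure: candidate recursion targets not yet visited
def muA (N v : List Int) : Nat := ((PySem.List.dedup N).toFinset.filter (fun x => x ∉ v)).card

lemma dfsA_succ (g : PySem.Dict Int (List Int)) (f : Nat) (s : Int) (v : PySem.Set Int) :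
    dfsA g (f+1) s v = (g.getD s []).foldl (stepA g f) (PySem.Set.add v s) := rfl

lemma dfsA_supset (g : PySem.Dict Int (List Int)) :
    ∀ (f : Nat) (s : Int) (v : PySem.Set Int) (x : Int), x ∈ v → x ∈ dfsA g f s v := by
  intro f
  induction f with
  | zero => intro s v x hx; simpa [dfsA] using hx
  | succ f ih =>
    intro s v x hx
    rw [dfsA_succ]
    have hx' : x ∈ PySem.Set.add v s := (PySem.Set.mem_add v s x).mpr (Or.inl hx)
    have aux : ∀ (l : List Int) (w : PySem.Set Int), x ∈ w → x ∈ l.foldl (stepA g f) w := by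
      intro l
      induction l with
      | nil => intro w hw; simpa using hw
      | cons nb t iht =>
        intro w hw
        simp only [List.foldl_cons]
        apply iht
        unfold stepA
        split
        · exact hw
        · exact ih nb w x hw
    exact aux _ _ hx'

lemma foldl_stepA_supset (g : PySem.Dict Int (List Int)) (f : Nat) :
    ∀ (l : List Int) (w : PySem.Set Int) (x : Int), x ∈ w → x ∈ l.foldl (stepA g f) w := by
  intro l
  induction l with
  | nil => intro w x hw; simpa using hw
  | cons nb t iht =>
    intro w x hw
    simp only [List.foldl_cons]
    apply iht
    unfold stepA
    split
    · exact hw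
    · exact dfsA_supset g f nb w x hw

lemma foldl_stepA_inv (g : PySem.Dict Int (List Int)) (f : Nat)
    (Q : Int → Prop) (Inv : PySem.Set Int → Prop)
    (hstep : ∀ w nb, Inv w → Q nb → nb ∉ w → Inv (dfsA g f nb w)) :
    ∀ (l : List Int) (w : PySem.Set Int), (∀ nb ∈ l, Q nb) → Inv w →
      Inv (l.foldl (stepA g f) w) := by
  intro l
  induction l with
  | nil => intro w _ hInv; simpa using hInv
  | cons nb t iht =>
    intro w hQ hInv
    simp only [List.foldl_cons]
    apply iht _ (fun x hx => hQ x (List.mem_cons_of_mem _ hx))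
    unfold stepA
    split
    · exact hInv
    · rename_i hc
      have hnb : nb ∉ w := by
        intro hmem
        exact hc ((PySem.Set.contains_iff w nb).mpr hmem)
      exact hstep w nb hInv (hQ nb (List.mem_cons_self ..)) hnb

lemma foldl_stepA_master (g : PySem.Dict Int (List Int)) (f : Nat)
    (Q : Int → Prop) (Inv : PySem.Set Int → Prop)
    (hstep : ∀ w nb, Inv w → Q nb → nb ∉ w → Inv (dfsA g f nb w) ∧ nb ∈ dfsA g f nb w) :
    ∀ (l : List Int) (w : PySem.Set Int), (∀ nb ∈ l, Q nb) → Inv w →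
      Inv (l.foldl (stepA g f) w) ∧ ∀ nb ∈ l, nb ∈ l.foldl (stepA g f) w := by
  intro l
  induction l with
  | nil => intro w _ hInv; simpa using hInv
  | cons nb t iht =>
    intro w hQ hInv
    simp only [List.foldl_cons]
    have hmemfold := foldl_stepA_supset g f t
    by_cases hnb : nb ∈ w
    · have hstepA : stepA g f w nb = w := by
        unfold stepA; exact if_pos ((PySem.Set.contains_iff w nb).mpr hnb)
      rw [hstepA]
      obtain ⟨h1, h2⟩ := iht w (fun x hx => hQ x (List.mem_cons_of_mem _ hx)) hInv
      refine ⟨h1, ?_⟩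
      intro y hy
      rcases List.mem_cons.mp hy with rfl | hy
      · exact hmemfold w y hnb
      · exact h2 y hy
    · have hstepA : stepA g f w nb = dfsA g f nb w := by
        unfold stepA; exact if_neg (fun h => hnb ((PySem.Set.contains_iff w nb).mp h))
      rw [hstepA]
      obtain ⟨hInv', hnb'⟩ := hstep w nb hInv (hQ nb (List.mem_cons_self ..)) hnb
      obtain ⟨h1, h2⟩ := iht _ (fun x hx => hQ x (List.mem_cons_of_mem _ hx)) hInv'
      refine ⟨h1, ?_⟩
      intro y hy
      rcases List.mem_cons.mp hy with rfl | hy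
      · exact hmemfold _ y hnb'
      · exact h2 y hy

lemma dfsA_nodup (g : PySem.Dict Int (List Int)) :
    ∀ (f : Nat) (s : Int) (v : PySem.Set Int), v.Nodup → (dfsA g f s v).Nodup := by
  intro f
  induction f with
  | zero => intro s v hv; simpa [dfsA] using hv
  | succ f ih =>
    intro s v hv
    rw [dfsA_succ]
    exact foldl_stepA_inv g f (fun _ => True) (fun w => w.Nodup)
      (fun w nb hw _ _ => ih nb w hw) _ _ (fun _ _ => trivial)
      (PySem.Set.nodup_add v s hv)

lemma dfsA_sound (g : PySem.Dict Int (List Int)) :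
    ∀ (f : Nat) (s : Int) (v : PySem.Set Int) (x : Int), x ∈ dfsA g f s v →
      x ∈ v ∨ Relation.ReflTransGen (RelG g) s x := by
  intro f
  induction f with
  | zero => intro s v x hx; exact Or.inl (by simpa [dfsA] using hx)
  | succ f ih =>
    intro s v x hx
    rw [dfsA_succ] at hx
    refine foldl_stepA_inv g f (fun nb => Relation.ReflTransGen (RelG g) s nb)
      (fun w => ∀ y ∈ w, y ∈ v ∨ Relation.ReflTransGen (RelG g) s y)
      ?_ _ _ ?_ ?_ x hx
    · intro w nb hw hQ _ y hy
      rcases ih nb w y hy with hyw | hr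
      · exact hw y hyw
      · exact Or.inr (hQ.trans hr)
    · intro nb hnb
      exact Relation.ReflTransGen.single hnb
    · intro y hy
      rcases (PySem.Set.mem_add v s y).mp hy with h | rfl
      · exact Or.inl h
      · exact Or.inr Relation.ReflTransGen.refl

lemma dfsA_start (g : PySem.Dict Int (List Int)) (f : Nat) (s : Int) (v : PySem.Set Int)
    (hf : 1 ≤ f) : s ∈ dfsA g f s v := by
  obtain ⟨f', rfl⟩ : ∃ f', f = f' + 1 := ⟨f - 1, by omega⟩
  rw [dfsA_succ]
  exact foldl_stepA_supset g f' _ _ s ((PySem.Set.mem_add v s s).mpr (Or.inr rfl))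

lemma mu_le (N v : List Int) : muA N v ≤ N.length := by
  unfold muA
  calc ((PySem.List.dedup N).toFinset.filter (fun x => x ∉ v)).card
      ≤ (PySem.List.dedup N).toFinset.card := Finset.card_filter_le _ _
    _ ≤ (PySem.List.dedup N).length := List.toFinset_card_le _
    _ ≤ N.length := by
        rw [PySem.List.dedup_eq_ofList]
        exact PySem.Set.length_ofList_le N

lemma mu_lt (N v w : List Int) (b : Int) (hvw : ∀ x ∈ v, x ∈ w) (hbN : b ∈ N)
    (hbv : b ∉ v) (hbw : b ∈ w) : muA N w < muA N v := by
  unfold muA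
  apply Finset.card_lt_card
  rw [Finset.ssubset_iff_of_subset]
  · refine ⟨b, ?_, ?_⟩
    · rw [Finset.mem_filter, List.mem_toFinset, PySem.List.mem_dedup]
      exact ⟨hbN, hbv⟩
    · rw [Finset.mem_filter]
      rintro ⟨-, h⟩
      exact h hbw
  · intro x hx
    rw [Finset.mem_filter] at hx ⊢
    exact ⟨hx.1, fun hv => hx.2 (hvw x hv)⟩

lemma dfsA_closed (g : PySem.Dict Int (List Int)) (N : List Int)
    (HN : ∀ a b, b ∈ g.getD a [] → b ∈ N) :
    ∀ (k f : Nat) (s : Int) (v : PySem.Set Int), s ∉ v → muA N (PySem.Set.add v s) ≤ k → k < f →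
      ∀ a ∈ dfsA g f s v, a ∉ v → ∀ b, b ∈ g.getD a [] → b ∈ dfsA g f s v := by
  intro k
  induction k using Nat.strong_induction_on with
  | _ k ih =>
  intro f s v hsv hmu hkf
  obtain ⟨f', rfl⟩ : ∃ f', f = f' + 1 := ⟨f - 1, by omega⟩
  rw [dfsA_succ]
  have hmaster := foldl_stepA_master g f'
      (fun nb => nb ∈ g.getD s [])
      (fun w => (∀ y ∈ PySem.Set.add v s, y ∈ w) ∧
                (∀ a ∈ w, a ∉ v → a ≠ s → ∀ b, b ∈ g.getD a [] → b ∈ w))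
      ?_ (g.getD s []) (PySem.Set.add v s) (fun nb hnb => hnb) ⟨fun y hy => hy, ?_⟩
  · obtain ⟨⟨hsub, hclosed⟩, hnbs⟩ := hmaster
    intro a ha hav b hb
    by_cases has : a = s
    · subst has
      exact hnbs b hb
    · exact hclosed a ha hav has b hb
  · intro w nb hInv hQ hnbw
    obtain ⟨hsub, hclosed⟩ := hInv
    have hnbN : nb ∈ N := HN s nb hQ
    have hmu' : muA N (PySem.Set.add w nb) < muA N (PySem.Set.add v s) :=
      mu_lt N (PySem.Set.add v s) (PySem.Set.add w nb) nb
        (fun x hx => (PySem.Set.mem_add w nb x).mpr (Or.inl (hsub x hx)))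
        hnbN (fun h => hnbw (hsub nb h))
        ((PySem.Set.mem_add w nb nb).mpr (Or.inr rfl))
    have hk1 : muA N (PySem.Set.add w nb) < k := lt_of_lt_of_le hmu' hmu
    have hf' : muA N (PySem.Set.add w nb) < f' := by omega
    refine ⟨⟨fun y hy => dfsA_supset g f' nb w y (hsub y hy), ?_⟩,
      dfsA_start g f' nb w (by omega)⟩
    intro a ha hav has b hb
    by_cases haw : a ∈ w
    · exact dfsA_supset g f' nb w b (hclosed a haw hav has b hb)
    · exact ih (muA N (PySem.Set.add w nb)) hk1 f' nb w hnbw (le_refl _) hf' a ha haw b hb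
  · intro a ha hav has
    rcases (PySem.Set.mem_add v s a).mp ha with h | h
    · exact absurd h hav
    · exact absurd h has

lemma dfsA_mem (g : PySem.Dict Int (List Int)) (N : List Int)
    (HN : ∀ a b, b ∈ g.getD a [] → b ∈ N) (s x : Int) :
    x ∈ dfsA g (N.length + 1) s PySem.Set.empty ↔ Relation.ReflTransGen (RelG g) s x := by
  constructor
  · intro hx
    rcases dfsA_sound g _ s _ x hx with h | h
    · exact absurd h (by simp [PySem.Set.empty])
    · exact h
  · intro h
    have hstart : s ∈ dfsA g (N.length + 1) s PySem.Set.empty :=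
      dfsA_start _ _ _ _ (by omega)
    have hclosed := dfsA_closed g N HN (muA N (PySem.Set.add PySem.Set.empty s))
      (N.length + 1) s PySem.Set.empty (by simp [PySem.Set.empty]) (le_refl _)
      (by have := mu_le N (PySem.Set.add PySem.Set.empty s); omega)
    induction h with
    | refl => exact hstart
    | tail hab hrel ihh => exact hclosed _ ihh (by simp [PySem.Set.empty]) _ hrel

-- ---- B side ----

lemma bfsB_succ (adj : PySem.Dict Int (List Int)) (f : Nat) (seen : PySem.Set Int)
    (frontier : List Int) :
    bfsB adj (f+1) seen frontier =
      if frontier = [] then seen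
      else bfsB adj f (frontier.foldl (expandQ adj) (seen, [])).1
        (frontier.foldl (expandQ adj) (seen, [])).2 := rfl

lemma stepQ_mono (q : PySem.Set Int × List Int) (b x : Int) (hx : x ∈ q.1) :
    x ∈ (stepQ q b).1 := by
  unfold stepQ
  split
  · exact hx
  · exact (PySem.Set.mem_add q.1 b x).mpr (Or.inl hx)

lemma expandQ_mono (_adj : PySem.Dict Int (List Int)) (_a : Int) :
    ∀ (l : List Int) (q : PySem.Set Int × List Int) (x : Int), x ∈ q.1 → x ∈ (l.foldl stepQ q).1 := by
  intro l
  induction l with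
  | nil => intro q x hx; exact hx
  | cons b t ih => intro q x hx; exact ih _ x (stepQ_mono q b x hx)

lemma outer_mono (adj : PySem.Dict Int (List Int)) :
    ∀ (F : List Int) (q : PySem.Set Int × List Int) (x : Int), x ∈ q.1 →
      x ∈ (F.foldl (expandQ adj) q).1 := by
  intro F
  induction F with
  | nil => intro q x hx; exact hx
  | cons a t ih => intro q x hx; exact ih _ x (expandQ_mono adj a _ q x hx)

lemma stepQ_nodup (q : PySem.Set Int × List Int) (b : Int) (h : q.1.Nodup) :
    (stepQ q b).1.Nodup := by
  unfold stepQ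
  split
  · exact h
  · exact PySem.Set.nodup_add q.1 b h

lemma outer_nodup (adj : PySem.Dict Int (List Int)) :
    ∀ (F : List Int) (q : PySem.Set Int × List Int), q.1.Nodup →
      (F.foldl (expandQ adj) q).1.Nodup := by
  have inner : ∀ (l : List Int) (q : PySem.Set Int × List Int), q.1.Nodup →
      (l.foldl stepQ q).1.Nodup := by
    intro l
    induction l with
    | nil => intro q h; exact h
    | cons b t ih => intro q h; exact ih _ (stepQ_nodup q b h)
  intro F
  induction F with
  | nil => intro q h; exact h
  | cons a t ih => intro q h; exact ih _ (inner _ q h)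

lemma bfsB_mono (adj : PySem.Dict Int (List Int)) :
    ∀ (f : Nat) (seen : PySem.Set Int) (frontier : List Int) (x : Int), x ∈ seen →
      x ∈ bfsB adj f seen frontier := by
  intro f
  induction f with
  | zero => intro seen frontier x hx; exact hx
  | succ f ih =>
    intro seen frontier x hx
    rw [bfsB_succ]
    split
    · exact hx
    · exact ih _ _ x (outer_mono adj frontier (seen, []) x hx)

lemma bfsB_nodup (adj : PySem.Dict Int (List Int)) :
    ∀ (f : Nat) (seen : PySem.Set Int) (frontier : List Int), seen.Nodup →
      (bfsB adj f seen frontier).Nodup := by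
  intro f
  induction f with
  | zero => intro seen frontier h; exact h
  | succ f ih =>
    intro seen frontier h
    rw [bfsB_succ]
    split
    · exact h
    · exact ih _ _ (outer_nodup adj frontier (seen, []) h)

-- the invariant of one round of the while loop
def QInv (adj : PySem.Dict Int (List Int)) (F : List Int) (seen : PySem.Set Int)
    (q : PySem.Set Int × List Int) : Prop :=
  (∀ x ∈ seen, x ∈ q.1) ∧
  (∀ x ∈ q.1, x ∈ seen ∨ x ∈ q.2) ∧
  (∀ x ∈ q.2, x ∈ q.1 ∧ x ∉ seen ∧ ∃ a ∈ F, x ∈ adj.getD a [])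

lemma stepQ_inv (adj : PySem.Dict Int (List Int)) (F : List Int) (seen : PySem.Set Int)
    (q : PySem.Set Int × List Int) (a b : Int) (ha : a ∈ F) (hb : b ∈ adj.getD a [])
    (h : QInv adj F seen q) :
    QInv adj F seen (stepQ q b) ∧ b ∈ (stepQ q b).1 := by
  obtain ⟨h1, h2, h3⟩ := h
  unfold stepQ
  by_cases hc : PySem.Set.contains q.1 b = true
  · rw [if_pos hc]
    exact ⟨⟨h1, h2, h3⟩, (PySem.Set.contains_iff q.1 b).mp hc⟩
  · rw [if_neg hc]
    have hbq : b ∉ q.1 := fun hmem => hc ((PySem.Set.contains_iff q.1 b).mpr hmem)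
    refine ⟨⟨?_, ?_, ?_⟩, (PySem.Set.mem_add q.1 b b).mpr (Or.inr rfl)⟩
    · intro x hx
      exact (PySem.Set.mem_add q.1 b x).mpr (Or.inl (h1 x hx))
    · intro x hx
      rcases (PySem.Set.mem_add q.1 b x).mp hx with hx' | rfl
      · rcases h2 x hx' with h | h
        · exact Or.inl h
        · exact Or.inr (List.mem_append_left _ h)
      · exact Or.inr (List.mem_append_right _ (List.mem_singleton.mpr rfl))
    · intro x hx
      rcases List.mem_append.mp hx with hx' | hx'
      · obtain ⟨hq, hs, hp⟩ := h3 x hx'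
        exact ⟨(PySem.Set.mem_add q.1 b x).mpr (Or.inl hq), hs, hp⟩
      · have : x = b := List.mem_singleton.mp hx'
        subst this
        exact ⟨(PySem.Set.mem_add q.1 x x).mpr (Or.inr rfl),
          fun hs => hbq (h1 x hs), ⟨a, ha, hb⟩⟩

lemma expandQ_inv (adj : PySem.Dict Int (List Int)) (F : List Int) (seen : PySem.Set Int)
    (a : Int) (ha : a ∈ F) :
    ∀ (l : List Int) (q : PySem.Set Int × List Int), (∀ b ∈ l, b ∈ adj.getD a []) →
      QInv adj F seen q →
      QInv adj F seen (l.foldl stepQ q) ∧ ∀ b ∈ l, b ∈ (l.foldl stepQ q).1 := by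
  intro l
  induction l with
  | nil => intro q _ h; exact ⟨h, by simp⟩
  | cons b t ih =>
    intro q hl h
    simp only [List.foldl_cons]
    obtain ⟨h', hbmem⟩ := stepQ_inv adj F seen q a b ha (hl b (List.mem_cons_self ..)) h
    obtain ⟨hfin, hrest⟩ := ih _ (fun c hc => hl c (List.mem_cons_of_mem _ hc)) h'
    refine ⟨hfin, ?_⟩
    intro c hc
    rcases List.mem_cons.mp hc with rfl | hc'
    · exact expandQ_mono adj a t _ c hbmem
    · exact hrest c hc'

lemma frontier_expand (adj : PySem.Dict Int (List Int)) (F : List Int) (seen : PySem.Set Int) :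
    QInv adj F seen (F.foldl (expandQ adj) (seen, [])) ∧
      ∀ a ∈ F, ∀ b ∈ adj.getD a [], b ∈ (F.foldl (expandQ adj) (seen, [])).1 := by
  have aux : ∀ (l : List Int) (q : PySem.Set Int × List Int), (∀ a ∈ l, a ∈ F) →
      QInv adj F seen q →
      QInv adj F seen (l.foldl (expandQ adj) q) ∧
        ∀ a ∈ l, ∀ b ∈ adj.getD a [], b ∈ (l.foldl (expandQ adj) q).1 := by
    intro l
    induction l with
    | nil => intro q _ h; exact ⟨h, by simp⟩
    | cons a t ih =>
      intro q hl h
      simp only [List.foldl_cons]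
      obtain ⟨h', hnbs⟩ := expandQ_inv adj F seen a (hl a (List.mem_cons_self ..))
        (adj.getD a []) q (fun _ hb => hb) h
      obtain ⟨hfin, hrest⟩ := ih _ (fun c hc => hl c (List.mem_cons_of_mem _ hc)) h'
      refine ⟨hfin, ?_⟩
      intro c hc b hb
      rcases List.mem_cons.mp hc with rfl | hc'
      · exact outer_mono adj t _ b (hnbs b hb)
      · exact hrest c hc' b hb
  exact aux F (seen, []) (fun _ h => h) ⟨fun x h => h, fun x h => Or.inl h, by simp⟩

lemma bfsB_sound (adj : PySem.Dict Int (List Int)) (i : Int) :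
    ∀ (f : Nat) (seen : PySem.Set Int) (frontier : List Int),
      (∀ x ∈ seen, Relation.ReflTransGen (RelG adj) i x) → (∀ x ∈ frontier, x ∈ seen) →
      ∀ x ∈ bfsB adj f seen frontier, Relation.ReflTransGen (RelG adj) i x := by
  intro f
  induction f with
  | zero => intro seen frontier hseen _ x hx; exact hseen x hx
  | succ f ih =>
    intro seen frontier hseen hfs x hx
    rw [bfsB_succ] at hx
    split at hx
    · exact hseen x hx
    · obtain ⟨⟨h1, h2, h3⟩, -⟩ := frontier_expand adj frontier seen
      refine ih _ _ ?_ (fun y hy => (h3 y hy).1) x hx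
      intro y hy
      rcases h2 y hy with hy' | hy'
      · exact hseen y hy'
      · obtain ⟨-, -, a, haF, hrel⟩ := h3 y hy'
        exact (hseen a (hfs a haF)).trans (Relation.ReflTransGen.single hrel)

lemma bfsB_closed (adj : PySem.Dict Int (List Int)) (N : List Int)
    (HN : ∀ a b, b ∈ adj.getD a [] → b ∈ N) :
    ∀ (f k : Nat) (seen : PySem.Set Int) (frontier : List Int),
      muA N seen ≤ k → k + 2 ≤ f →
      (∀ x ∈ frontier, x ∈ seen) →
      (∀ a ∈ seen, a ∉ frontier → ∀ b ∈ adj.getD a [], b ∈ seen) →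
      ∀ a ∈ bfsB adj f seen frontier, ∀ b ∈ adj.getD a [], b ∈ bfsB adj f seen frontier := by
  intro f
  induction f with
  | zero => intro k seen frontier _ hk; omega
  | succ f ih =>
    intro k seen frontier hmu hk hfs hcl
    rw [bfsB_succ]
    by_cases hF : frontier = []
    · rw [if_pos hF]
      intro a ha b hb
      exact hcl a ha (by rw [hF]; exact List.not_mem_nil) b hb
    · rw [if_neg hF]
      obtain ⟨⟨h1, h2, h3⟩, hproc⟩ := frontier_expand adj frontier seen
      set P := frontier.foldl (expandQ adj) (seen, []) with hP
      have hfs' : ∀ x ∈ P.2, x ∈ P.1 := fun x hx => (h3 x hx).1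
      have hcl' : ∀ a ∈ P.1, a ∉ P.2 → ∀ b ∈ adj.getD a [], b ∈ P.1 := by
        intro a ha hanot b hb
        rcases h2 a ha with ha' | ha'
        · by_cases haf : a ∈ frontier
          · exact hproc a haf b hb
          · exact h1 b (hcl a ha' haf b hb)
        · exact absurd ha' hanot
      by_cases hF' : P.2 = []
      · have hres : bfsB adj f P.1 P.2 = P.1 := by
          obtain ⟨f', rfl⟩ : ∃ f', f = f' + 1 := ⟨f - 1, by omega⟩
          rw [bfsB_succ, if_pos hF']
        rw [hres]
        intro a ha b hb
        exact hcl' a ha (by rw [hF']; exact List.not_mem_nil) b hb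
      · obtain ⟨y, hy⟩ := List.exists_mem_of_ne_nil P.2 hF'
        obtain ⟨hy1, hy2, a0, ha0, hrel0⟩ := h3 y hy
        have hmu' : muA N P.1 < muA N seen :=
          mu_lt N seen P.1 y h1 (HN a0 y hrel0) hy2 hy1
        exact ih (k - 1) P.1 P.2 (by omega) (by omega) hfs' hcl'

lemma reachB_mem (adj : PySem.Dict Int (List Int)) (N : List Int)
    (HN : ∀ a b, b ∈ adj.getD a [] → b ∈ N) (i x : Int) :
    x ∈ reachB adj (N.length + 2) i ↔ Relation.ReflTransGen (RelG adj) i x := by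
  unfold reachB
  have hs0 : PySem.Set.ofList [i] = [i] :=
    PySem.Set.ofList_eq_self_of_nodup _ (by simp)
  constructor
  · refine bfsB_sound adj i _ _ _ ?_ ?_ x
    · intro y hy
      have : y = i := by rw [hs0] at hy; simpa using hy
      subst this
      exact Relation.ReflTransGen.refl
    · intro y hy
      rw [hs0]
      exact hy
  · intro h
    have hstart : i ∈ bfsB adj (N.length + 2) (PySem.Set.ofList [i]) [i] :=
      bfsB_mono adj _ _ _ i (by rw [hs0]; simp)
    have hclosed := bfsB_closed adj N HN (N.length + 2) (muA N (PySem.Set.ofList [i]))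
      (PySem.Set.ofList [i]) [i] (le_refl _)
      (by have := mu_le N (PySem.Set.ofList [i]); omega)
      (fun y hy => by rw [hs0]; exact hy)
      (by
        intro a ha hnot
        rw [hs0] at ha
        exact absurd ha hnot)
    induction h with
    | refl => exact hstart
    | tail hab hrel ihh => exact hclosed _ ihh _ hrel

-- ---- bridge: the dicts A builds describe the edge lists B reads ----

lemma fold_pair (l : List (Int × Int)) (d₁ d₂ : PySem.Dict Int (List Int)) :
    l.foldl (fun p ab => (p.1.modify ab.1 [] (· ++ [ab.2]), p.2.modify ab.2 [] (· ++ [ab.1]))) (d₁, d₂) =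
      (l.foldl (fun d ab => d.modify ab.1 [] (· ++ [ab.2])) d₁,
       l.foldl (fun d ab => d.modify ab.2 [] (· ++ [ab.1])) d₂) := by
  induction l generalizing d₁ d₂ with
  | nil => rfl
  | cons ab t ih => simp only [List.foldl_cons]; exact ih _ _

lemma rev_fold_eq (l : List (Int × Int)) (d : PySem.Dict Int (List Int)) :
    l.foldl (fun d ab => d.modify ab.2 [] (· ++ [ab.1])) d =
      (l.map (fun p => (p.2, p.1))).foldl (fun d ab => d.modify ab.1 [] (· ++ [ab.2])) d := by
  induction l generalizing d with
  | nil => rfl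
  | cons ab t ih => simp only [List.foldl_cons, List.map_cons]; exact ih _

lemma RelG_graph_iff (l : List (Int × Int)) (a b : Int) :
    RelG (l.foldl (fun d ab => d.modify ab.1 [] (· ++ [ab.2])) PySem.Dict.empty) a b ↔ (a, b) ∈ l := by
  unfold RelG
  rw [PySem.Dict.getD_foldl_modify_append l PySem.Dict.empty a]
  rw [show (PySem.Dict.empty : PySem.Dict Int (List Int)).getD a [] = [] from rfl,
    List.nil_append]
  simp only [List.mem_map, List.mem_filter, beq_iff_eq]
  constructor
  · rintro ⟨p, ⟨hp, h1⟩, h2⟩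
    have : p = (a, b) := Prod.ext h1 h2
    rwa [this] at hp
  · intro h
    exact ⟨(a, b), ⟨h, rfl⟩, rfl⟩

lemma length_eq_of_nodup_iff (l₁ l₂ : List Int) (h₁ : l₁.Nodup) (h₂ : l₂.Nodup)
    (h : ∀ x, x ∈ l₁ ↔ x ∈ l₂) : l₁.length = l₂.length := by
  rw [← List.toFinset_card_of_nodup h₁, ← List.toFinset_card_of_nodup h₂]
  congr 1
  ext x
  simp only [List.mem_toFinset]
  exact h x


lemma empty_nodup : (PySem.Set.empty : PySem.Set Int).Nodup := List.nodup_nil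

lemma per_index_eq (comparisons : List (Int × Int)) (i : Int) :
    (PySem.Set.union
        (dfsA (comparisons.foldl (fun d ab => d.modify ab.1 [] (· ++ [ab.2]))
          PySem.Dict.empty) (comparisons.length + 1) i PySem.Set.empty)
        (dfsA (comparisons.foldl (fun d ab => d.modify ab.2 [] (· ++ [ab.1]))
          PySem.Dict.empty) (comparisons.length + 1) i PySem.Set.empty)).length =
      (PySem.Set.union
        (reachB (comparisons.foldl (fun d ab => d.modify ab.1 [] (· ++ [ab.2]))
          PySem.Dict.empty) (comparisons.length + 2) i)
        (reachB (comparisons.foldl (fun d ab => d.modify ab.2 [] (· ++ [ab.1]))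
          PySem.Dict.empty) (comparisons.length + 2) i)).length := by
  set gfwd := comparisons.foldl (fun d ab => d.modify ab.1 [] (· ++ [ab.2])) PySem.Dict.empty
    with hgfwd
  set grev := comparisons.foldl (fun d ab => d.modify ab.2 [] (· ++ [ab.1])) PySem.Dict.empty
    with hgrev
  have HNf : ∀ a b, b ∈ gfwd.getD a [] → b ∈ comparisons.map (·.2) := by
    intro a b hb
    exact List.mem_map.mpr ⟨(a, b), (RelG_graph_iff comparisons a b).mp hb, rfl⟩
  have HNr : ∀ a b, b ∈ grev.getD a [] → b ∈ comparisons.map (·.1) := by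
    intro a b hb
    rw [hgrev, rev_fold_eq] at hb
    have hb' : RelG ((comparisons.map (fun p => (p.2, p.1))).foldl
        (fun d ab => d.modify ab.1 [] (· ++ [ab.2])) PySem.Dict.empty) a b := hb
    have h := (RelG_graph_iff (comparisons.map (fun p => (p.2, p.1))) a b).mp hb'
    obtain ⟨p, hp, he⟩ := List.mem_map.mp h
    refine List.mem_map.mpr ⟨p, hp, ?_⟩
    have : p.1 = b := congrArg Prod.snd he
    exact this
  apply length_eq_of_nodup_iff
  · exact PySem.Set.nodup_union _ _ (dfsA_nodup _ _ _ _ empty_nodup)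
  · exact PySem.Set.nodup_union _ _
      (bfsB_nodup _ _ _ _ (PySem.Set.nodup_ofList [i]))
  · intro x
    rw [PySem.Set.mem_union, PySem.Set.mem_union]
    have hA1 : x ∈ dfsA gfwd (comparisons.length + 1) i PySem.Set.empty ↔
        Relation.ReflTransGen (RelG gfwd) i x := by
      have := dfsA_mem gfwd (comparisons.map (·.2)) HNf i x
      simpa [List.length_map] using this
    have hA2 : x ∈ dfsA grev (comparisons.length + 1) i PySem.Set.empty ↔
        Relation.ReflTransGen (RelG grev) i x := by
      have := dfsA_mem grev (comparisons.map (·.1)) HNr i x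
      simpa [List.length_map] using this
    have hB1 : x ∈ reachB gfwd (comparisons.length + 2) i ↔
        Relation.ReflTransGen (RelG gfwd) i x := by
      have := reachB_mem gfwd (comparisons.map (·.2)) HNf i x
      simpa [List.length_map] using this
    have hB2 : x ∈ reachB grev (comparisons.length + 2) i ↔
        Relation.ReflTransGen (RelG grev) i x := by
      have := reachB_mem grev (comparisons.map (·.1)) HNr i x
      simpa [List.length_map] using this
    rw [hA1, hA2, hB1, hB2]

-- ===== VERDICT (by name: the statement is the Claim_ definition above) =====
theorem solve_spec : Claim_equal_solve := by
  intro n comparisons _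
  show solve n comparisons = solve_alt n comparisons
  simp only [solve, solve_alt]
  rw [fold_pair]
  rw [PySem.List.foldl_append_singleton_eq_map
    (fun i => n - ((PySem.Set.union
      (dfsA (comparisons.foldl (fun d ab => d.modify ab.1 [] (· ++ [ab.2]))
        PySem.Dict.empty) (comparisons.length + 1) i PySem.Set.empty)
      (dfsA (comparisons.foldl (fun d ab => d.modify ab.2 [] (· ++ [ab.1]))
        PySem.Dict.empty) (comparisons.length + 1) i PySem.Set.empty)).length : Int))]
  rw [List.nil_append]
  apply List.map_congr_left
  intro i _
  rw [per_index_eq comparisons i]
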